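-- pv_equiv track=rewrite | github.com/El-Dimaron/hilel_pro | Homework 19/mountain_task.py | maximum_height
-- ===== SOURCE A (Python) =====
-- def maximum_height(mountain):
--     left_pointer = 0
--     max_depth = 0
--
--     for right_pointer in range(1, len(mountain)):
--
--         max_height = min(mountain[right_pointer], mountain[left_pointer])
--         min_height = min(min(mountain[left_pointer:right_pointer]), mountain[right_pointer])
--
--         if max_height - min_height > max_depth:
--             max_depth = max_height - min_height
--
--         if mountain[right_pointer] >= mountain[left_pointer]:
--             left_pointer = right_pointer
--
--     return max_depth
-- ===== SOURCE B (Python) =====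
-- def maximum_height(mountain):
--     if not mountain:
--         return 0
--     left_pointer = 0
--     cur_min = mountain[0]
--     max_depth = 0
--     for r in range(1, len(mountain)):
--         h = mountain[r]
--         base = mountain[left_pointer]
--         depth = min(h, base) - min(cur_min, h)
--         if depth > max_depth:
--             max_depth = depth
--         if h >= base:
--             left_pointer = r
--             cur_min = h
--         else:
--             cur_min = min(cur_min, h)
--     return max_depth
-- ===== Notes on version B (the rewrite author's own statement) =====
-- stated objective: faster
-- what changed: B maintains the minimum of the window mountain[left_pointer:r] incrementally in a running variable (reset when the left pointer jumps) instead of rescanning the slice with min() at every step, turning the O(n^2) loop into a single O(n) pass.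
import Mathlib
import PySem

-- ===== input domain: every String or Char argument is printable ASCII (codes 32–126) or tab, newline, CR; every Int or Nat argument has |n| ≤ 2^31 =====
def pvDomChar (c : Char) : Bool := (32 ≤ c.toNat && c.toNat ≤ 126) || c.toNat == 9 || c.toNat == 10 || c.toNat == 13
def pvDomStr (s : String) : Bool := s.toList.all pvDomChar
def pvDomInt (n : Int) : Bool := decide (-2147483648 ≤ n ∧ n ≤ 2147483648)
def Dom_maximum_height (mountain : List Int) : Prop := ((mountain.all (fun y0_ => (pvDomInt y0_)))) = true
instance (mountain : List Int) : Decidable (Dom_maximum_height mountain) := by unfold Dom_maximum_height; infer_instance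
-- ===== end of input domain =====

-- B replaces A's per-step min() rescan of mountain[left_pointer:r] by an incrementally
-- maintained window minimum, reset when the left pointer jumps: O(n) instead of O(n^2).

-- ===== PORT A =====
-- min(xs) for a nonempty list (the only way A uses it; default never reached inside A's loop)
def minGD (xs : List Int) : Int := (PySem.List.min? xs (fun y => y)).getD 0

def stepA (mountain : List Int) (st : Int × Int) (right_pointer : Int) : Int × Int :=
  let left_pointer := st.1
  let max_depth := st.2
  let max_height := min (PySem.List.pyGetD mountain right_pointer 0)
                        (PySem.List.pyGetD mountain left_pointer 0)
  let min_height := min (minGD (PySem.List.slice mountain (some left_pointer) (some right_pointer)))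
                        (PySem.List.pyGetD mountain right_pointer 0)
  let max_depth := if max_height - min_height > max_depth then max_height - min_height else max_depth
  let left_pointer := if PySem.List.pyGetD mountain right_pointer 0 ≥ PySem.List.pyGetD mountain left_pointer 0
                      then right_pointer else left_pointer
  (left_pointer, max_depth)

def maximum_height (mountain : List Int) : Int :=
  ((PySem.List.pyRange 1 (mountain.length : Int) 1).foldl (stepA mountain) (0, 0)).2

-- ===== PORT B =====
-- state: (left_pointer, cur_min, max_depth)
def stepB (mountain : List Int) (st : Int × Int × Int) (r : Int) : Int × Int × Int :=
  let lp := st.1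
  let cm := st.2.1
  let d := st.2.2
  let h := PySem.List.pyGetD mountain r 0
  let base := PySem.List.pyGetD mountain lp 0
  let depth := min h base - min cm h
  let d := if depth > d then depth else d
  if h ≥ base then (r, h, d) else (lp, min cm h, d)

def maximum_height_alt (mountain : List Int) : Int :=
  match mountain with
  | [] => 0
  | m0 :: _ =>
    ((PySem.List.pyRange 1 (mountain.length : Int) 1).foldl (stepB mountain) (0, m0, 0)).2.2

-- ===== PRECONDITION & SPEC =====
def Spec_maximum_height (mountain : List Int) (out : Int) : Prop := out = maximum_height_alt mountain
instance (mountain : List Int) (out : Int) : Decidable (Spec_maximum_height mountain out) := by unfold Spec_maximum_height; infer_instance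

-- ===== CLAIM (what is proved, stated in full; the proofs are below) =====
def Claim_equal_maximum_height : Prop := ∀ (mountain : List Int), Dom_maximum_height mountain → Spec_maximum_height mountain (maximum_height mountain)

-- ===== LEMMAS AND PROOFS =====

theorem minGD_singleton (x : Int) : minGD [x] = x := by
  simp [minGD, PySem.List.min?_id_cons]

theorem minGD_append_singleton (xs : List Int) (y : Int) (h : xs ≠ []) :
    minGD (xs ++ [y]) = min (minGD xs) y := by
  cases xs with
  | nil => exact absurd rfl h
  | cons x t =>
    simp [minGD, List.cons_append, PySem.List.min?_id_cons, List.foldl_append]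

-- drop/take window extension by one element
theorem take_drop_succ (m : List Int) (l k : Nat) (hl : l ≤ k) (hk : k < m.length) :
    (m.drop l).take (k + 1 - l) = (m.drop l).take (k - l) ++ [m[k]] := by
  have h1 : k + 1 - l = (k - l) + 1 := by omega
  rw [h1, List.take_add_one]
  have h2 : (m.drop l)[k - l]? = some m[k] := by
    rw [List.getElem?_drop]
    have : l + (k - l) = k := by omega
    rw [this, List.getElem?_eq_getElem hk]
  simp [h2]

theorem slice_window (m : List Int) (lp a : Int) (h0 : 0 ≤ lp) (hla : lp < a)
    (hk : a.toNat < m.length) :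
    PySem.List.slice m (some lp) (some (a + 1)) =
      PySem.List.slice m (some lp) (some a) ++ [m[a.toNat]] := by
  rw [PySem.List.slice_toNat m h0 (by omega), PySem.List.slice_toNat m h0 (by omega)]
  have h1 : (a + 1).toNat = a.toNat + 1 := by omega
  rw [h1]
  exact take_drop_succ m lp.toNat a.toNat (by omega) hk

theorem slice_one (m : List Int) (a : Int) (h0 : 0 ≤ a) (hk : a.toNat < m.length) :
    PySem.List.slice m (some a) (some (a + 1)) = [m[a.toNat]] := by
  rw [PySem.List.slice_toNat m h0 (by omega)]
  have h1 : (a + 1).toNat - a.toNat = 1 := by omega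
  rw [h1]
  simpa using take_drop_succ m a.toNat a.toNat le_rfl hk

theorem slice_nonempty (m : List Int) (lp a : Int) (h0 : 0 ≤ lp) (hla : lp < a)
    (hk : lp.toNat < m.length) :
    PySem.List.slice m (some lp) (some a) ≠ [] := by
  rw [PySem.List.slice_toNat m h0 (by omega)]
  intro hcon
  have hlen := congrArg List.length hcon
  simp [List.length_take, List.length_drop] at hlen
  omega

-- one step of B keeps the window-minimum invariant and tracks A's state
theorem step_rel (m : List Int) (lp d a : Int)
    (h0 : 0 ≤ lp) (hla : lp < a) (hkn : a.toNat < m.length) :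
    stepB m (lp, minGD (PySem.List.slice m (some lp) (some a)), d) a =
      ((stepA m (lp, d) a).1,
       minGD (PySem.List.slice m (some (stepA m (lp, d) a).1) (some (a + 1))),
       (stepA m (lp, d) a).2) := by
  have hga : PySem.List.pyGetD m a 0 = m[a.toNat] :=
    PySem.List.pyGetD_eq_getElem m 0 (by omega) (by omega)
  by_cases hge : PySem.List.pyGetD m lp 0 ≤ PySem.List.pyGetD m a 0
  · simp only [stepA, stepB, ge_iff_le, hge, if_true]
    rw [slice_one m a (by omega) hkn, minGD_singleton, hga]
  · simp only [stepA, stepB, ge_iff_le, hge, if_false]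
    rw [slice_window m lp a h0 hla hkn,
        minGD_append_singleton _ _ (slice_nonempty m lp a h0 hla (by omega)), hga]

theorem stepA_fst_lt (m : List Int) (lp d a : Int) (hla : lp < a) :
    (stepA m (lp, d) a).1 < a + 1 := by
  simp only [stepA]
  split_ifs <;> omega

theorem stepA_fst_nonneg (m : List Int) (lp d a : Int) (h0 : 0 ≤ lp) (ha : 0 ≤ a) :
    0 ≤ (stepA m (lp, d) a).1 := by
  simp only [stepA]
  split_ifs <;> omega

-- the main loop invariant: with cur_min = min(mountain[lp:a]) the two folds agree
theorem loop_eq (m : List Int) : ∀ (fuel : Nat) (a lp d : Int),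
    0 ≤ lp → lp < a → fuel = ((m.length : Int) - a).toNat →
    ((PySem.List.pyRange a (m.length : Int) 1).foldl (stepA m) (lp, d)).2 =
    ((PySem.List.pyRange a (m.length : Int) 1).foldl (stepB m)
        (lp, minGD (PySem.List.slice m (some lp) (some a)), d)).2.2 := by
  intro fuel
  induction fuel with
  | zero =>
    intro a lp d h0 hla hf
    have hle : (m.length : Int) ≤ a := by omega
    rw [PySem.List.pyRange_one_eq_nil hle]
    rfl
  | succ n ih =>
    intro a lp d h0 hla hf
    by_cases hab : a < (m.length : Int)
    · rw [PySem.List.pyRange_one_cons hab]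
      simp only [List.foldl_cons]
      rw [step_rel m lp d a h0 hla (by omega)]
      rcases hsa : stepA m (lp, d) a with ⟨lp', d'⟩
      have h1 : 0 ≤ lp' := by
        have := stepA_fst_nonneg m lp d a h0 (by omega); rw [hsa] at this; exact this
      have h2 : lp' < a + 1 := by
        have := stepA_fst_lt m lp d a hla; rw [hsa] at this; exact this
      exact ih (a + 1) lp' d' h1 h2 (by omega)
    · have hle : (m.length : Int) ≤ a := by omega
      rw [PySem.List.pyRange_one_eq_nil hle]
      rfl

-- ===== VERDICT (by name: the statement is the Claim_ definition above) =====
theorem maximum_height_spec : Claim_equal_maximum_height := by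
  intro mountain _
  unfold Spec_maximum_height maximum_height maximum_height_alt
  cases mountain with
  | nil => simp [PySem.List.pyRange_one_eq_nil]
  | cons m0 t =>
    rw [loop_eq (m0 :: t) ((((m0 :: t).length : Int) - 1).toNat) 1 0 0
      (by omega) (by omega) rfl]
    have hs : PySem.List.slice (m0 :: t) (some 0) (some 1) = [m0] := by
      have := slice_one (m0 :: t) 0 (by omega) (by simp)
      simpa using this
    rw [hs, minGD_singleton]
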